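-- pv_equiv track=rewrite | github.com/RadiumGu/graph-dependency-platform | dr-plan-generator/assessment/impact_analyzer.py | _estimate_rpo
-- ===== SOURCE A (Python) =====
-- from typing import Any, Dict, List, Optional
--
-- def _estimate_rpo(nodes: List[Dict[str, Any]]) -> int:
--     """Estimate RPO in minutes based on data layer node types.
--
--     Args:
--         nodes: All affected nodes.
--
--     Returns:
--         Estimated RPO in minutes.
--     """
--     max_rpo = 0
--     for node in nodes:
--         rtype = node.get("type", "")
--         if rtype in ("RDSCluster", "RDSInstance"):
--             max_rpo = max(max_rpo, 5)
--         elif rtype == "DynamoDBTable":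
--             max_rpo = max(max_rpo, 0)
--         elif rtype in ("S3Bucket",):
--             max_rpo = max(max_rpo, 60)
--     return max_rpo
-- ===== SOURCE B (Python) =====
-- def _estimate_rpo(nodes):
--     """Estimate RPO in minutes based on data layer node types."""
--     types = {n.get("type", "") for n in nodes}
--     if "S3Bucket" in types:
--         return 60
--     if "RDSCluster" in types or "RDSInstance" in types:
--         return 5
--     return 0
-- ===== Notes on version B (the rewrite author's own statement) =====
-- stated objective: simpler
-- what changed: Replaces the running-max fold over every node with a one-shot set of present node types followed by ordered priority membership checks (60 > 5 > 0).
import Mathlib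
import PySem

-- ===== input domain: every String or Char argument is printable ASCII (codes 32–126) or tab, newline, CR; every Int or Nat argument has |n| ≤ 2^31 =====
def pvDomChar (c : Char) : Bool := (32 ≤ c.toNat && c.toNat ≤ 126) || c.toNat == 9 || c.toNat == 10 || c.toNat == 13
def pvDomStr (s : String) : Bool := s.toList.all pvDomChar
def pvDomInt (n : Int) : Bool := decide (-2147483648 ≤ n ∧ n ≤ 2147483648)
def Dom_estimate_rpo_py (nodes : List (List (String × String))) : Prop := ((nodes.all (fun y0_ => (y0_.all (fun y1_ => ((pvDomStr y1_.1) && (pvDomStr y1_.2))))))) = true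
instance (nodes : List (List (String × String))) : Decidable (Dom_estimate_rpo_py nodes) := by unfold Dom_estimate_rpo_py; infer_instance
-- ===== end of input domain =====

-- B replaces A's running-max fold with a set of present node types plus ordered priority membership checks (simpler).


-- ===== PORT A =====
def estimate_rpo_py (nodes : List (List (String × String))) : Int :=
  nodes.foldl (fun max_rpo node =>
    let rtype := PySem.Dict.getD ⟨node⟩ "type" ""
    if rtype = "RDSCluster" ∨ rtype = "RDSInstance" then max max_rpo 5
    else if rtype = "DynamoDBTable" then max max_rpo 0
    else if rtype = "S3Bucket" then max max_rpo 60
    else max_rpo) 0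

-- ===== PORT B =====
def estimate_rpo_py_alt (nodes : List (List (String × String))) : Int :=
  let types : PySem.Set String :=
    PySem.Set.ofList (nodes.map (fun n => PySem.Dict.getD ⟨n⟩ "type" ""))
  if PySem.Set.contains types "S3Bucket" then 60
  else if PySem.Set.contains types "RDSCluster" || PySem.Set.contains types "RDSInstance" then 5
  else 0

-- ===== PRECONDITION & SPEC =====
def Spec_estimate_rpo_py (nodes : List (List (String × String))) (out : Int) : Prop := out = estimate_rpo_py_alt nodes
instance (nodes : List (List (String × String))) (out : Int) : Decidable (Spec_estimate_rpo_py nodes out) := by unfold Spec_estimate_rpo_py; infer_instance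

-- ===== CLAIM (what is proved, stated in full; the proofs are below) =====
def Claim_equal_estimate_rpo_py : Prop := ∀ (nodes : List (List (String × String))), Dom_estimate_rpo_py nodes → Spec_estimate_rpo_py nodes (estimate_rpo_py nodes)

-- ===== LEMMAS AND PROOFS =====

-- The priority value of a list of node types (proof-only helper).
def rpoOf (T : List String) : Int :=
  if "S3Bucket" ∈ T then 60 else if "RDSCluster" ∈ T ∨ "RDSInstance" ∈ T then 5 else 0

theorem rpoOf_nonneg (T : List String) : 0 ≤ rpoOf T := by
  unfold rpoOf; split_ifs <;> omega

-- B equals the priority value of the mapped node types.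
theorem alt_eq_rpoOf (nodes : List (List (String × String))) :
    estimate_rpo_py_alt nodes = rpoOf (nodes.map (fun n => PySem.Dict.getD ⟨n⟩ "type" "")) := by
  simp only [estimate_rpo_py_alt, rpoOf, PySem.Set.contains_iff, PySem.Set.mem_ofList,
    Bool.or_eq_true]

-- Combinatorial core: one step of A's fold against the priority value of the remaining types.
theorem fold_step_max (t : String) (T : List String) (acc : Int) (hacc : 0 ≤ acc) :
    max (if t = "RDSCluster" ∨ t = "RDSInstance" then max acc 5
        else if t = "DynamoDBTable" then max acc 0
        else if t = "S3Bucket" then max acc 60 else acc)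
      (if "S3Bucket" ∈ T then (60:Int) else if "RDSCluster" ∈ T ∨ "RDSInstance" ∈ T then 5 else 0) =
    max acc (if "S3Bucket" = t ∨ "S3Bucket" ∈ T then (60:Int)
             else if ("RDSCluster" = t ∨ "RDSCluster" ∈ T) ∨ ("RDSInstance" = t ∨ "RDSInstance" ∈ T) then 5 else 0) := by
  by_cases h1 : t = "S3Bucket" <;> by_cases h2 : t = "RDSCluster" <;>
    by_cases h3 : t = "RDSInstance" <;> by_cases h4 : t = "DynamoDBTable" <;>
    simp [h1, h2, h3, h4, Int.max_def] <;> split_ifs <;> first | omega | tauto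

-- A's fold, from any nonnegative accumulator, is the max of the accumulator and the priority value.
theorem fold_eq_max (nodes : List (List (String × String))) (acc : Int) (hacc : 0 ≤ acc) :
    nodes.foldl (fun max_rpo node =>
      let rtype := PySem.Dict.getD ⟨node⟩ "type" ""
      if rtype = "RDSCluster" ∨ rtype = "RDSInstance" then max max_rpo 5
      else if rtype = "DynamoDBTable" then max max_rpo 0
      else if rtype = "S3Bucket" then max max_rpo 60
      else max_rpo) acc =
    max acc (rpoOf (nodes.map (fun n => PySem.Dict.getD ⟨n⟩ "type" ""))) := by
  induction nodes generalizing acc with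
  | nil => simp [rpoOf]; omega
  | cons n ns ih =>
    simp only [List.foldl_cons, List.map_cons]
    generalize PySem.Dict.getD (⟨n⟩ : PySem.Dict String String) "type" "" = t
    have step : 0 ≤ (if t = "RDSCluster" ∨ t = "RDSInstance" then max acc 5
        else if t = "DynamoDBTable" then max acc 0
        else if t = "S3Bucket" then max acc 60 else acc) := by
      split_ifs <;> omega
    rw [ih _ step]
    unfold rpoOf
    simp only [List.mem_cons]
    exact fold_step_max t _ acc hacc

-- ===== VERDICT (by name: the statement is the Claim_ definition above) =====
theorem estimate_rpo_py_spec : Claim_equal_estimate_rpo_py := by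
  intro nodes _
  show estimate_rpo_py nodes = estimate_rpo_py_alt nodes
  rw [estimate_rpo_py, fold_eq_max nodes 0 le_rfl, alt_eq_rpoOf]
  have := rpoOf_nonneg (nodes.map (fun n => PySem.Dict.getD ⟨n⟩ "type" ""))
  omega
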